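-- pv_equiv track=rewrite | github.com/fluiddyn/fluiddyn | fluiddyn/util/xmltotext.py | get_indent_after_tag
-- ===== SOURCE A (Python) =====
-- def get_indent_after_tag(text):
--     i = 0
--     pos_space = text.find(' ', i)
--     while i == pos_space:
--         i += 1
--         pos_space = text.find(' ', i)
--     if pos_space == -1:
--         nb_space_indent = 0
--     else:
--         nb_space_indent = pos_space+1
--     return ' '*nb_space_indent
-- ===== SOURCE B (Python) =====
-- def get_indent_after_tag(text):
--     in_tag = False
--     for i, ch in enumerate(text):
--         if ch == ' ':
--             if in_tag:
--                 return ' ' * (i + 1)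
--         else:
--             in_tag = True
--     return ''
-- ===== Notes on version B (the rewrite author's own statement) =====
-- stated objective: alternative
-- what changed: Replaced A's repeated substring-search (find restarted after each leading space, then arithmetic on the found position) by a single character-level state-machine scan with a boolean flag that early-returns at the first space encountered after a non-space character.
import Mathlib
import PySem

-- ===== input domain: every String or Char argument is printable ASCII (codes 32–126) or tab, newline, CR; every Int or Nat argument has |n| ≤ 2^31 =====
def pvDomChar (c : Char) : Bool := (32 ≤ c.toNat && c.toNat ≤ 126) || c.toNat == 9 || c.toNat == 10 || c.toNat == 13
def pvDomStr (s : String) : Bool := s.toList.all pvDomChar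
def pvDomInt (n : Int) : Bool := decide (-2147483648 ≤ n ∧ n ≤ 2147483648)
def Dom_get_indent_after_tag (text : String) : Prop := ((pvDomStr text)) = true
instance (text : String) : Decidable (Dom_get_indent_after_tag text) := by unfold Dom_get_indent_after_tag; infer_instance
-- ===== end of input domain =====

-- B replaces A's repeated substring-search loop by a single character-level state-machine scan
-- (boolean flag, early return at the first space after a non-space); objective: alternative.

-- ===== PORT A =====
-- termination fact for A's while-loop, cited by pvA_go's decreasing_by:
-- if the search from i finds a space exactly at i, then i < len(text).
theorem pvA_lt (cs : List Char) (i : Nat)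
    (h : PySem.Chars.findFrom cs [' '] (i : Int) none = (i : Int)) : i < cs.length := by
  by_cases hle : i ≤ cs.length
  · rw [PySem.Chars.findFrom_natCast cs [' '] i hle] at h
    split at h
    · omega
    · have h0 : PySem.Chars.find (cs.drop i) [' '] = 0 := by omega
      have hpre := (PySem.Chars.find_spec (s := cs.drop i) (sub := [' ']) (by rw [h0])).1
      rw [h0] at hpre
      simp at hpre
      rcases hpre with ⟨t, ht⟩
      have : cs.drop i ≠ [] := by rw [← ht]; simp
      have := List.length_lt_of_drop_ne_nil this
      omega
  · -- i past the end: findFrom returns -1, contradicting h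
    exfalso
    simp only [PySem.Chars.findFrom] at h
    rw [if_pos (by omega)] at h
    omega

-- while i == pos_space: i += 1; pos_space = text.find(' ', i)  (returns the final pos_space)
def pvA_go (cs : List Char) (i : Nat) : Int :=
  let pos_space := PySem.Chars.findFrom cs [' '] (i : Int) none
  if h : (i : Int) = pos_space then pvA_go cs (i + 1) else pos_space
termination_by cs.length - i
decreasing_by have := pvA_lt cs i h.symm; omega

def get_indent_after_tag (text : String) : String :=
  let pos_space := pvA_go text.toList 0
  let nb_space_indent : Int := if pos_space = -1 then 0 else pos_space + 1
  String.ofList (List.replicate nb_space_indent.toNat ' ')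

-- ===== PORT B =====
-- for i, ch in enumerate(text): state-machine scan carrying the index i and the in_tag flag
def pvB_go (cs : List Char) (i : Nat) (in_tag : Bool) : String :=
  match cs with
  | [] => ""
  | ch :: rest =>
    if ch == ' ' then
      if in_tag then String.ofList (List.replicate (i + 1) ' ')
      else pvB_go rest (i + 1) in_tag
    else pvB_go rest (i + 1) true

def get_indent_after_tag_alt (text : String) : String :=
  pvB_go text.toList 0 false

-- ===== PRECONDITION & SPEC =====
def Spec_get_indent_after_tag (text : String) (out : String) : Prop := out = get_indent_after_tag_alt text
instance (text : String) (out : String) : Decidable (Spec_get_indent_after_tag text out) := by unfold Spec_get_indent_after_tag; infer_instance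

-- ===== CLAIM (what is proved, stated in full; the proofs are below) =====
def Claim_equal_get_indent_after_tag : Prop := ∀ (text : String), Dom_get_indent_after_tag text → Spec_get_indent_after_tag text (get_indent_after_tag text)

-- ===== LEMMAS AND PROOFS =====

-- find l ' ' = 0 exactly when l starts with a space
theorem pv_find_zero_iff (l : List Char) :
    PySem.Chars.find l [' '] = 0 ↔ [' '] <+: l := by
  constructor
  · intro h0
    have := (PySem.Chars.find_spec (s := l) (sub := [' ']) (by rw [h0])).1
    rwa [h0] at this
  · intro hp
    have hnn : 0 ≤ PySem.Chars.find l [' '] :=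
      (PySem.Chars.find_nonneg_iff l [' ']).2 hp.isInfix
    have hsp := PySem.Chars.find_spec (s := l) (sub := [' ']) hnn
    by_contra hne
    have : 0 < (PySem.Chars.find l [' ']).toNat := by omega
    exact hsp.2 0 this (by simpa using hp)

-- dropping the leading-space block is dropWhile
theorem pv_drop_k (cs : List Char) :
    cs.drop (cs.takeWhile (· == ' ')).length = cs.dropWhile (· == ' ') := by
  have h := List.takeWhile_append_dropWhile (p := (· == ' ')) (l := cs)
  have h2 := List.drop_left (l₁ := cs.takeWhile (· == ' ')) (l₂ := cs.dropWhile (· == ' '))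
  rwa [h] at h2

-- A's loop reaches i = number of leading spaces
theorem pvA_go_eq_at_k (cs : List Char) (i : Nat)
    (hik : i ≤ (cs.takeWhile (· == ' ')).length) :
    pvA_go cs i = pvA_go cs (cs.takeWhile (· == ' ')).length := by
  rcases Nat.lt_or_ge i (cs.takeWhile (· == ' ')).length with hlt | hge
  · have hlen : i < cs.length :=
      lt_of_lt_of_le hlt (List.takeWhile_prefix (· == ' ')).length_le
    have hsp : cs[i] = ' ' := by
      have hmem : (cs.takeWhile (· == ' '))[i]'hlt ∈ cs.takeWhile (· == ' ') :=
        List.getElem_mem _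
      have hp := List.mem_takeWhile_imp hmem
      have heq := (List.takeWhile_prefix (p := (· == ' ')) (l := cs)).getElem hlt
      simp only [heq] at hp
      simpa using hp
    have hpre : [' '] <+: cs.drop i := by
      rw [List.drop_eq_getElem_cons hlen, hsp]
      exact ⟨_, rfl⟩
    have hfind0 : PySem.Chars.find (cs.drop i) [' '] = 0 := (pv_find_zero_iff _).2 hpre
    have hcond : (i : Int) = PySem.Chars.findFrom cs [' '] (i : Int) none := by
      rw [PySem.Chars.findFrom_natCast cs [' '] i (le_of_lt hlen), hfind0]
      simp
    rw [pvA_go, dif_pos hcond]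
    exact pvA_go_eq_at_k cs (i + 1) hlt
  · have : i = (cs.takeWhile (· == ' ')).length := le_antisymm hik hge
    rw [this]
termination_by (cs.takeWhile (· == ' ')).length - i

-- the value A's loop returns, in terms of dropWhile
theorem pvA_go_zero (cs : List Char) :
    pvA_go cs 0 =
      (if PySem.Chars.find (cs.dropWhile (· == ' ')) [' '] = -1 then -1
       else ((cs.takeWhile (· == ' ')).length : Int) +
            PySem.Chars.find (cs.dropWhile (· == ' ')) [' ']) := by
  have hk : (cs.takeWhile (· == ' ')).length ≤ cs.length :=
    (List.takeWhile_prefix (· == ' ')).length_le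
  rw [pvA_go_eq_at_k cs 0 (Nat.zero_le _)]
  rw [pvA_go]
  rw [PySem.Chars.findFrom_natCast cs [' '] _ hk, pv_drop_k]
  set k := (cs.takeWhile (· == ' ')).length with hkdef
  have hnosp : PySem.Chars.find (cs.dropWhile (· == ' ')) [' '] ≠ 0 := by
    rw [Ne, pv_find_zero_iff]
    intro hp
    have hne : cs.dropWhile (· == ' ') ≠ [] := by
      intro hnil; rw [hnil] at hp; simpa using hp.length_le
    have hhead := List.head?_dropWhile_not (α := Char) (· == ' ') cs
    rcases hp with ⟨t, ht⟩
    rw [← ht] at hhead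
    simp at hhead
  have hge : -1 ≤ PySem.Chars.find (cs.dropWhile (· == ' ')) [' '] :=
    PySem.Chars.neg_one_le_find _ _
  have hcond : ¬ ((k : Int) = if PySem.Chars.find (cs.dropWhile (· == ' ')) [' '] = -1 then -1
      else (k : Int) + PySem.Chars.find (cs.dropWhile (· == ' ')) [' ']) := by
    split <;> omega
  rw [dif_neg hcond]

-- find on a cons whose head is not the searched char: shift by one
theorem pv_find_cons (c : Char) (rest : List Char) (hc : c ≠ ' ') :
    PySem.Chars.find (c :: rest) [' '] =
      if PySem.Chars.find rest [' '] = -1 then -1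
      else PySem.Chars.find rest [' '] + 1 := by
  by_cases hm : PySem.Chars.find rest [' '] = -1
  · rw [if_pos hm]
    rw [PySem.Chars.find_eq_neg_one_iff] at hm ⊢
    intro hinf
    rcases List.infix_cons_iff.1 hinf with hp | hi
    · rcases hp with ⟨t, ht⟩
      simp at ht
      exact hc ht.1.symm
    · exact hm hi
  · rw [if_neg hm]
    have hge : -1 ≤ PySem.Chars.find rest [' '] := PySem.Chars.neg_one_le_find _ _
    have hmnn : 0 ≤ PySem.Chars.find rest [' '] := by omega
    have hmspec := PySem.Chars.find_spec (s := rest) (sub := [' ']) hmnn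
    have hinf : ([' '] : List Char) <:+: (c :: rest) :=
      List.infix_cons_iff.2 (Or.inr (hmspec.1.isInfix.trans (List.drop_suffix _ _).isInfix))
    have hfnn : 0 ≤ PySem.Chars.find (c :: rest) [' '] :=
      (PySem.Chars.find_nonneg_iff _ _).2 hinf
    have hfspec := PySem.Chars.find_spec (s := c :: rest) (sub := [' ']) hfnn
    have hf0 : PySem.Chars.find (c :: rest) [' '] ≠ 0 := by
      intro h0
      rcases (pv_find_zero_iff _).1 h0 with ⟨t, ht⟩
      simp at ht
      exact hc ht.1.symm
    -- f ≤ m + 1 : a prefix of rest.drop m.toNat is a prefix of (c::rest).drop (m.toNat+1)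
    have hup : (PySem.Chars.find (c :: rest) [' ']).toNat ≤
        (PySem.Chars.find rest [' ']).toNat + 1 := by
      by_contra hgt
      exact hfspec.2 ((PySem.Chars.find rest [' ']).toNat + 1) (by omega)
        (by simpa using hmspec.1)
    -- m ≤ f - 1 : prefix of (c::rest).drop f.toNat = rest.drop (f.toNat - 1)
    have hdown : (PySem.Chars.find rest [' ']).toNat ≤
        (PySem.Chars.find (c :: rest) [' ']).toNat - 1 := by
      by_contra hgt
      apply hmspec.2 ((PySem.Chars.find (c :: rest) [' ']).toNat - 1) (by omega)
      have := hfspec.1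
      rwa [show (PySem.Chars.find (c :: rest) [' ']).toNat =
        ((PySem.Chars.find (c :: rest) [' ']).toNat - 1) + 1 by omega,
        List.drop_succ_cons] at this
    omega

-- B's scan with in_tag = true is the find-formula
theorem pvB_go_true (cs : List Char) (i : Nat) :
    pvB_go cs i true =
      (if PySem.Chars.find cs [' '] = -1 then ""
       else String.ofList (List.replicate (i + (PySem.Chars.find cs [' ']).toNat + 1) ' ')) := by
  induction cs generalizing i with
  | nil =>
    have h : PySem.Chars.find ([] : List Char) [' '] = -1 := by decide
    rw [h]
    rfl
  | cons c rest ih =>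
    by_cases hc : c = ' '
    · subst hc
      have h0 : PySem.Chars.find (' ' :: rest) [' '] = 0 :=
        (pv_find_zero_iff _).2 ⟨rest, rfl⟩
      simp [pvB_go, h0]
    · have h1 : pvB_go (c :: rest) i true = pvB_go rest (i + 1) true := by
        simp [pvB_go, hc]
      rw [h1, ih, pv_find_cons c rest hc]
      have hge : -1 ≤ PySem.Chars.find rest [' '] := PySem.Chars.neg_one_le_find _ _
      by_cases hm : PySem.Chars.find rest [' '] = -1
      · simp [hm]
      · rw [if_neg hm, if_neg hm, if_neg (show ¬(PySem.Chars.find rest [' '] + 1 = -1) by omega)]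
        have hEq : i + 1 + (PySem.Chars.find rest [' ']).toNat + 1
            = i + (PySem.Chars.find rest [' '] + 1).toNat + 1 := by omega
        rw [hEq]

-- B's scan with in_tag = false skips the leading-space block
theorem pvB_go_false (cs : List Char) (i : Nat) :
    pvB_go cs i false =
      pvB_go (cs.dropWhile (· == ' ')) (i + (cs.takeWhile (· == ' ')).length) false := by
  induction cs generalizing i with
  | nil => rfl
  | cons c rest ih =>
    by_cases hc : c = ' '
    · subst hc
      have h1 : pvB_go (' ' :: rest) i false = pvB_go rest (i + 1) false := by
        simp [pvB_go]
      rw [h1, ih, List.dropWhile_cons_of_pos (by simp), List.takeWhile_cons_of_pos (by simp),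
        List.length_cons]
      have hEq : i + 1 + (List.takeWhile (· == ' ') rest).length
          = i + ((List.takeWhile (· == ' ') rest).length + 1) := by omega
      rw [hEq]
    · rw [List.dropWhile_cons_of_neg (by simpa using hc),
        List.takeWhile_cons_of_neg (by simpa using hc)]
      rfl

theorem pv_main (text : String) :
    get_indent_after_tag text = get_indent_after_tag_alt text := by
  show String.ofList (List.replicate
      (if pvA_go text.toList 0 = -1 then (0 : Int) else pvA_go text.toList 0 + 1).toNat ' ')
    = pvB_go text.toList 0 false
  rw [pvA_go_zero, pvB_go_false]
  have hhead := List.head?_dropWhile_not (α := Char) (· == ' ') text.toList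
  generalize hd : List.dropWhile (· == ' ') text.toList = d at *
  generalize hk : (List.takeWhile (· == ' ') text.toList).length = k at *
  cases d with
  | nil =>
    have hnil : PySem.Chars.find ([] : List Char) [' '] = -1 := by decide
    simp [hnil, pvB_go]
  | cons c rest =>
    have hc : c ≠ ' ' := by simpa using hhead
    have h1 : pvB_go (c :: rest) (0 + k) false = pvB_go rest (0 + k + 1) true := by
      simp [pvB_go, hc]
    rw [h1, pvB_go_true, pv_find_cons c rest hc]
    have hge : -1 ≤ PySem.Chars.find rest [' '] := PySem.Chars.neg_one_le_find _ _
    by_cases hm : PySem.Chars.find rest [' '] = -1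
    · simp [hm]
    · rw [if_neg hm, if_neg hm,
        if_neg (show ¬(PySem.Chars.find rest [' '] + 1 = -1) by omega),
        if_neg (show ¬((k : Int) + (PySem.Chars.find rest [' '] + 1) = -1) by omega)]
      have hEq : ((k : Int) + (PySem.Chars.find rest [' '] + 1) + 1).toNat
          = 0 + k + 1 + (PySem.Chars.find rest [' ']).toNat + 1 := by omega
      rw [hEq]

-- ===== VERDICT (by name: the statement is the Claim_ definition above) =====
theorem get_indent_after_tag_spec : Claim_equal_get_indent_after_tag := by
  intro text _
  unfold Spec_get_indent_after_tag
  exact pv_main text
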